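-- pv_equiv track=rewrite | github.com/MirceaLupan/BrainnestTraining | assignment 4/euler10.py | check
-- ===== SOURCE A (Python) =====
-- def check(d, nums, rems, quotients):
--     """Check if 1/d contain recurring cycle and store decimal fraction part in quotients"""
--     l = len(nums)
--     for i in range(l - 2, -1, -1):
--         if nums[i] == nums[l - 1] and rems[i] == rems[l - 1]:
--             quotients[d] = [l - i - 1,
--                             "".join([str(x) for x in nums[0:i]]),
--                             "".join([str(x) for x in nums[i:l - 1]])]
--             return True
--     return False
-- ===== SOURCE B (Python) =====
-- def check(d, nums, rems, quotients):
--     """Check if 1/d contain recurring cycle and store decimal fraction part in quotients"""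
--     l = len(nums)
--     # Forward pass: index every position whose digit matches the last digit by its
--     # (digit, remainder) pair; later positions overwrite earlier ones, so the dict
--     # holds the closest (largest) matching index.  One lookup resolves the cycle.
--     seen = {(n, rems[i]): i for i, n in enumerate(nums[:l - 1]) if n == nums[l - 1]}
--     if not seen:
--         return False
--     i = seen.get((nums[l - 1], rems[l - 1]))
--     if i is None:
--         return False
--     quotients[d] = [l - i - 1,
--                     "".join(str(x) for x in nums[0:i]),
--                     "".join(str(x) for x in nums[i:l - 1])]
--     return True
-- ===== Notes on version B (the rewrite author's own statement) =====
-- stated objective: alternative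
-- what changed: A scans backward from the end for the most recent position with the same (digit, remainder) pair; B makes one forward pass that builds a dict keyed by (digit, remainder) (later positions overwrite earlier ones) and resolves the match with a single lookup.
import Mathlib
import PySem

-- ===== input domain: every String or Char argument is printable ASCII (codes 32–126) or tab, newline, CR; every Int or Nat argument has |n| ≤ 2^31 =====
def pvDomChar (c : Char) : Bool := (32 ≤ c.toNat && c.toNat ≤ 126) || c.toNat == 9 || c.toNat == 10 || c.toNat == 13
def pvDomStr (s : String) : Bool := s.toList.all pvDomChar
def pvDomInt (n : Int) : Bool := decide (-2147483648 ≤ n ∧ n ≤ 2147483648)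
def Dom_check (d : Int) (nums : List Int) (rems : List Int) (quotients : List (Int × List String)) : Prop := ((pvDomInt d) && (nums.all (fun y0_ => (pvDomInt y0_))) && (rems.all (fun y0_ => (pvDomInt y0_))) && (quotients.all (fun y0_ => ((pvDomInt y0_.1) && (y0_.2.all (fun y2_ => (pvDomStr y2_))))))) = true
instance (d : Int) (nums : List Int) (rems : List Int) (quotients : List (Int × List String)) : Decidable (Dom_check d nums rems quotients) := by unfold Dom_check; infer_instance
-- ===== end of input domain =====

-- B replaces A's backward scan by a forward pass that indexes matching (digit, remainder)
-- pairs in a dict resolved by one lookup; the equivalence proved is about the RETURN VALUE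
-- only (both programs write the same entry quotients[d] when they return True).

-- ===== PORT A =====
-- the backward loop 'for i in range(l-2, -1, -1)', recursing on the list of indices
def checkLoopA (nums rems : List Int) (l : Int) : List Int → Bool
  | [] => false
  | i :: is =>
    match PySem.List.pyGet? nums i, PySem.List.pyGet? nums (l - 1) with
    | some a, some a' =>
      if a = a' then
        match PySem.List.pyGet? rems i, PySem.List.pyGet? rems (l - 1) with
        | some r, some r' =>
          if r = r' then true else checkLoopA nums rems l is
        | _, _ => false      -- Python raises IndexError here; outside Pre_check
      else checkLoopA nums rems l is
    | _, _ => false          -- unreachable for indices produced by the range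

def check (d : Int) (nums : List Int) (rems : List Int) (quotients : List (Int × List String)) : Bool :=
  checkLoopA nums rems (nums.length : Int)
    (PySem.List.pyRange ((nums.length : Int) - 2) (-1) (-1))

-- ===== PORT B =====
-- the dict comprehension over enumerate(nums[:l-1]) filtered by n == nums[l-1]
def seenB (nums rems : List Int) : PySem.Dict (Int × Int) Int :=
  (PySem.List.enumerate
      (PySem.List.slice nums none (some ((nums.length : Int) - 1)))).foldl
    (fun dct p =>
      match PySem.List.pyGet? nums ((nums.length : Int) - 1) with
      | some lastn =>
        if p.2 = lastn then
          match PySem.List.pyGet? rems p.1 with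
          | some r => dct.insert (p.2, r) p.1
          | none => dct      -- Python raises IndexError here; outside Pre_check
        else dct
      | none => dct)         -- unreachable: the comprehension is empty when nums has < 2 items
    PySem.Dict.empty

def check_alt (d : Int) (nums : List Int) (rems : List Int) (quotients : List (Int × List String)) : Bool :=
  let seen := seenB nums rems
  if seen.size = 0 then false     -- 'if not seen: return False'
  else
    match PySem.List.pyGet? nums ((nums.length : Int) - 1),
          PySem.List.pyGet? rems ((nums.length : Int) - 1) with
    | some a, some b => ((seen.get? (a, b)).isSome : Bool)   -- 'i is None' test
    | _, _ => false              -- Python raises IndexError here; outside Pre_check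

-- ===== PRECONDITION & SPEC =====
-- Pre_check excludes exactly the inputs on which A raises IndexError: whenever some digit
-- matches the last one, rems must be long enough for the remainders to be compared there
-- (quotients is a dict in Python, so quotients[d] = ... never raises).
def Pre_check (d : Int) (nums : List Int) (rems : List Int) (quotients : List (Int × List String)) : Prop :=
  ∀ i < nums.length - 1,
    nums.getD i 0 = nums.getD (nums.length - 1) 0 →
    nums.length ≤ rems.length
instance (d : Int) (nums : List Int) (rems : List Int) (quotients : List (Int × List String)) : Decidable (Pre_check d nums rems quotients) := by unfold Pre_check; infer_instance

def pvWitness_check : Int × List Int × List Int × (List (Int × List String)) :=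
  (0, [1, 2, 1], [3, 4, 3], [(0, [])])

def Spec_check (d : Int) (nums : List Int) (rems : List Int) (quotients : List (Int × List String)) (out : Bool) : Prop := out = check_alt d nums rems quotients
instance (d : Int) (nums : List Int) (rems : List Int) (quotients : List (Int × List String)) (out : Bool) : Decidable (Spec_check d nums rems quotients out) := by unfold Spec_check; infer_instance

-- ===== CLAIM (what is proved, stated in full; the proofs are below) =====
def Claim_equal_check : Prop := ∀ (d : Int) (nums : List Int) (rems : List Int) (quotients : List (Int × List String)), Dom_check d nums rems quotients → Pre_check d nums rems quotients → Spec_check d nums rems quotients (check d nums rems quotients)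

-- ===== LEMMAS AND PROOFS =====

-- full (digit, remainder) match of position k against the last position
def fm (nums rems : List Int) (k : Nat) : Bool :=
  decide (nums.getD k 0 = nums.getD (nums.length - 1) 0) &&
  decide (rems.getD k 0 = rems.getD (nums.length - 1) 0)

theorem pyGet?_getD (xs : List Int) (k : Nat) (hk : k < xs.length) :
    PySem.List.pyGet? xs (k : Int) = some (xs.getD k 0) := by
  rw [PySem.List.pyGet?_natCast, List.getElem?_eq_getElem hk, List.getD_eq_getElem _ _ hk]

theorem pyGet?_pred (xs : List Int) (h1 : 1 ≤ xs.length) :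
    PySem.List.pyGet? xs ((xs.length : Int) - 1) = some (xs.getD (xs.length - 1) 0) := by
  have h : (xs.length : Int) - 1 = ((xs.length - 1 : Nat) : Int) := by omega
  rw [h, pyGet?_getD _ _ (by omega)]

theorem pyGet?_pred' (xs ys : List Int) (h1 : 1 ≤ ys.length) (hle : ys.length ≤ xs.length) :
    PySem.List.pyGet? xs ((ys.length : Int) - 1) = some (xs.getD (ys.length - 1) 0) := by
  have h : (ys.length : Int) - 1 = ((ys.length - 1 : Nat) : Int) := by omega
  rw [h, pyGet?_getD _ _ (by omega)]

theorem loopA_no_match (nums rems : List Int)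
    (hno : ∀ k < nums.length - 1, nums.getD k 0 ≠ nums.getD (nums.length - 1) 0) :
    ∀ is : List Int, (∀ i ∈ is, 0 ≤ i ∧ i + 1 < (nums.length : Int)) →
      checkLoopA nums rems (nums.length : Int) is = false := by
  intro is
  induction is with
  | nil => intro _; rfl
  | cons i is ih =>
    intro hb
    obtain ⟨hi0, hilt⟩ := hb i (List.mem_cons_self ..)
    have hk : i.toNat < nums.length := by omega
    have hi : i = ((i.toNat : Nat) : Int) := by omega
    rw [checkLoopA, hi, pyGet?_getD _ _ hk, pyGet?_pred _ (by omega)]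
    dsimp only
    rw [if_neg (hno i.toNat (by omega))]
    exact ih (fun j hj => hb j (List.mem_cons_of_mem _ hj))

theorem loopA_any (nums rems : List Int) (hr : nums.length ≤ rems.length)
    (h2 : 2 ≤ nums.length) :
    ∀ is : List Int, (∀ i ∈ is, 0 ≤ i ∧ i + 1 < (nums.length : Int)) →
      checkLoopA nums rems (nums.length : Int) is
        = is.any (fun i => fm nums rems i.toNat) := by
  intro is
  induction is with
  | nil => intro _; rfl
  | cons i is ih =>
    intro hb
    obtain ⟨hi0, hilt⟩ := hb i (List.mem_cons_self ..)
    have hk : i.toNat < nums.length := by omega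
    have hi : i = ((i.toNat : Nat) : Int) := by omega
    rw [checkLoopA, hi, pyGet?_getD _ _ hk, pyGet?_pred _ (by omega)]
    dsimp only
    rw [List.any_cons, ← ih (fun j hj => hb j (List.mem_cons_of_mem _ hj))]
    simp only [Int.toNat_natCast]
    by_cases hn : nums.getD i.toNat 0 = nums.getD (nums.length - 1) 0
    · rw [if_pos hn, pyGet?_getD rems _ (by omega), pyGet?_pred' rems nums (by omega) hr]
      dsimp only
      by_cases hrm : rems.getD i.toNat 0 = rems.getD (nums.length - 1) 0
      · rw [if_pos hrm]
        have hf : fm nums rems i.toNat = true := by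
          unfold fm; rw [decide_eq_true hn, decide_eq_true hrm]; rfl
        rw [hf]; rfl
      · rw [if_neg hrm]
        have hf : fm nums rems i.toNat = false := by
          unfold fm; rw [decide_eq_false hrm]; simp
        rw [hf]; rfl
    · rw [if_neg hn]
      have hf : fm nums rems i.toNat = false := by
        unfold fm; rw [decide_eq_false hn]; simp
      rw [hf]; rfl

-- the fold of B's dict comprehension, characterised by a membership test
theorem seenB_fold_get (nums rems : List Int) (a : Int)
    (ha : PySem.List.pyGet? nums ((nums.length : Int) - 1) = some a) :
    ∀ (ps : List (Int × Int)) (dct : PySem.Dict (Int × Int) Int) (key : Int × Int),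
      ((ps.foldl (fun dct p =>
          match PySem.List.pyGet? nums ((nums.length : Int) - 1) with
          | some lastn =>
            if p.2 = lastn then
              match PySem.List.pyGet? rems p.1 with
              | some r => dct.insert (p.2, r) p.1
              | none => dct
            else dct
          | none => dct) dct).get? key).isSome
      = ((dct.get? key).isSome ||
          ps.any (fun p => decide (p.2 = a) &&
            (match PySem.List.pyGet? rems p.1 with
             | some r => decide (key = (p.2, r))
             | none => false))) := by
  intro ps
  induction ps with
  | nil => intro dct key; simp
  | cons p ps ih =>
    intro dct key
    rw [List.foldl_cons, List.any_cons, ih, ha]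
    dsimp only
    by_cases hp : p.2 = a
    · rw [if_pos hp]
      cases hre : PySem.List.pyGet? rems p.1 with
      | none => simp
      | some r =>
        rw [PySem.Dict.get?_insert]
        by_cases hk : key = (p.2, r)
        · simp [hk, hp]
        · simp [← hp, hk]
    · rw [if_neg hp]
      simp [hp]

-- when no digit matches the last one (or there is no last digit) the dict stays empty
theorem seenB_fold_id (nums rems : List Int) :
    ∀ (ps : List (Int × Int)) (dct : PySem.Dict (Int × Int) Int),
      (∀ p ∈ ps, ∀ lastn, PySem.List.pyGet? nums ((nums.length : Int) - 1) = some lastn →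
        p.2 ≠ lastn) →
      (ps.foldl (fun dct p =>
          match PySem.List.pyGet? nums ((nums.length : Int) - 1) with
          | some lastn =>
            if p.2 = lastn then
              match PySem.List.pyGet? rems p.1 with
              | some r => dct.insert (p.2, r) p.1
              | none => dct
            else dct
          | none => dct) dct) = dct := by
  intro ps
  induction ps with
  | nil => intro dct _; rfl
  | cons p ps ih =>
    intro dct hno
    rw [List.foldl_cons]
    have hstep : (match PySem.List.pyGet? nums ((nums.length : Int) - 1) with
        | some lastn =>
          if p.2 = lastn then
            match PySem.List.pyGet? rems p.1 with
            | some r => dct.insert (p.2, r) p.1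
            | none => dct
          else dct
        | none => dct) = dct := by
      cases h : PySem.List.pyGet? nums ((nums.length : Int) - 1) with
      | none => rfl
      | some lastn =>
        dsimp only
        rw [if_neg (hno p (List.mem_cons_self ..) lastn h)]
    rw [hstep]
    exact ih dct (fun q hq => hno q (List.mem_cons_of_mem _ hq))

theorem dict_get?_of_size_zero (dct : PySem.Dict (Int × Int) Int) (h : dct.size = 0)
    (key : Int × Int) : dct.get? key = none := by
  cases dct with
  | mk items =>
    cases items with
    | nil => rfl
    | cons q qs => simp [PySem.Dict.size] at h

theorem take_pred_eq_slice (nums : List Int) :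
    PySem.List.slice nums none (some ((nums.length : Int) - 1))
      = nums.take (nums.length - 1) := by
  by_cases h1 : 1 ≤ nums.length
  · rw [PySem.List.slice_to nums (by omega : (0:Int) ≤ (nums.length : Int) - 1)]
    congr 1
    omega
  · have hnil : nums = [] := List.length_eq_zero_iff.mp (by omega)
    subst hnil
    rfl

theorem check_spec : Claim_equal_check := by
  unfold Claim_equal_check
  intro d nums rems quotients _ hpre
  unfold Spec_check check check_alt
  have hbounds : ∀ i ∈ PySem.List.pyRange ((nums.length : Int) - 2) (-1) (-1),
      0 ≤ i ∧ i + 1 < (nums.length : Int) := by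
    intro i hi
    rw [PySem.List.mem_pyRange_neg_one] at hi
    omega
  by_cases hm : ∃ k, k < nums.length - 1 ∧ nums.getD k 0 = nums.getD (nums.length - 1) 0
  case neg =>
    push Not at hm
    have hA := loopA_no_match nums rems hm _ hbounds
    rw [hA]
    have hB : seenB nums rems = PySem.Dict.empty := by
      unfold seenB
      apply seenB_fold_id
      intro p hp lastn hlast hpa
      rw [take_pred_eq_slice, PySem.List.mem_enumerate_iff] at hp
      obtain ⟨k, hklt, hpe⟩ := hp
      have hk' : k < nums.length - 1 := by
        simp [List.length_take] at hklt
        omega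
      have hlast' : lastn = nums.getD (nums.length - 1) 0 := by
        rw [pyGet?_pred nums (by omega)] at hlast
        exact (Option.some_inj.mp hlast).symm
      have hp2 : p.2 = nums.getD k 0 := by
        rw [hpe]
        dsimp only
        rw [List.getElem_take, List.getD_eq_getElem nums 0 (by omega)]
      exact hm k hk' (by rw [← hp2, hpa, hlast'])
    dsimp only
    rw [hB]
    rfl
  case pos =>
    obtain ⟨k0, hk00, hk0m⟩ := hm
    have h2 : 2 ≤ nums.length := by omega
    have hr : nums.length ≤ rems.length := hpre k0 hk00 hk0m
    have ha := pyGet?_pred nums (by omega)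
    have hb := pyGet?_pred' rems nums (by omega) hr
    rw [loopA_any nums rems hr h2 _ hbounds]
    dsimp only
    rw [ha, hb]
    dsimp only
    have hAiff : ((PySem.List.pyRange ((nums.length : Int) - 2) (-1) (-1)).any
          (fun i => fm nums rems i.toNat) = true)
        ↔ ∃ k : Nat, k < nums.length - 1 ∧ fm nums rems k = true := by
      rw [List.any_eq_true]
      constructor
      · rintro ⟨i, hi, hfi⟩
        rw [PySem.List.mem_pyRange_neg_one] at hi
        exact ⟨i.toNat, by omega, hfi⟩
      · rintro ⟨k, hk, hfk⟩
        refine ⟨(k : Int), ?_, ?_⟩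
        · rw [PySem.List.mem_pyRange_neg_one]
          omega
        · simpa using hfk
    have hget2 : (((seenB nums rems).get?
          (nums.getD (nums.length - 1) 0, rems.getD (nums.length - 1) 0)).isSome = true)
        ↔ ∃ k : Nat, k < nums.length - 1 ∧ fm nums rems k = true := by
      unfold seenB
      rw [seenB_fold_get nums rems _ ha]
      simp only [PySem.Dict.get?_empty, Option.isSome_none, Bool.false_or]
      rw [List.any_eq_true]
      constructor
      · rintro ⟨p, hp, hfp⟩
        rw [take_pred_eq_slice, PySem.List.mem_enumerate_iff] at hp
        obtain ⟨k, hklt, hpe⟩ := hp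
        have hk' : k < nums.length - 1 := by
          simp [List.length_take] at hklt
          omega
        refine ⟨k, hk', ?_⟩
        subst hpe
        dsimp only at hfp
        rw [List.getElem_take, show ((0 : Int) + (k : Nat)) = ((k : Nat) : Int) by omega,
          pyGet?_getD rems k (by omega),
          ← List.getD_eq_getElem nums 0 (by omega)] at hfp
        unfold fm
        simp only [Bool.and_eq_true] at hfp
        obtain ⟨h1, h2'⟩ := hfp
        have h3 := of_decide_eq_true h2'
        rw [Prod.mk.injEq] at h3
        rw [h3.1, h3.2]
        simp
      · rintro ⟨k, hk, hfk⟩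
        unfold fm at hfk
        simp only [Bool.and_eq_true] at hfk
        obtain ⟨h1, h2'⟩ := hfk
        have h1' := of_decide_eq_true h1
        have h2'' := of_decide_eq_true h2'
        refine ⟨((k : Int), nums.getD k 0), ?_, ?_⟩
        · rw [take_pred_eq_slice, PySem.List.mem_enumerate_iff]
          refine ⟨k, by simp [List.length_take]; omega, ?_⟩
          rw [List.getElem_take, ← List.getD_eq_getElem nums 0 (by omega)]
          simp
        · dsimp only
          rw [pyGet?_getD rems k (by omega)]
          rw [h1', h2'']
          simp
    by_cases hsz : (seenB nums rems).size = 0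
    · rw [if_pos hsz]
      have h0 := dict_get?_of_size_zero _ hsz
        (nums.getD (nums.length - 1) 0, rems.getD (nums.length - 1) 0)
      rw [h0] at hget2
      simp only [Option.isSome_none, Bool.false_eq_true, false_iff] at hget2
      cases hA : (PySem.List.pyRange ((nums.length : Int) - 2) (-1) (-1)).any
          (fun i => fm nums rems i.toNat) with
      | false => rfl
      | true => exact absurd (hAiff.mp hA) hget2
    · rw [if_neg hsz]
      cases hA : (PySem.List.pyRange ((nums.length : Int) - 2) (-1) (-1)).any
          (fun i => fm nums rems i.toNat) with
      | false =>
        cases hB2 : ((seenB nums rems).get?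
            (nums.getD (nums.length - 1) 0, rems.getD (nums.length - 1) 0)).isSome with
        | false => rfl
        | true =>
          rw [hA] at hAiff
          simp only [Bool.false_eq_true, false_iff] at hAiff
          exact absurd (hget2.mp hB2) hAiff
      | true =>
        cases hB2 : ((seenB nums rems).get?
            (nums.getD (nums.length - 1) 0, rems.getD (nums.length - 1) 0)).isSome with
        | true => rfl
        | false =>
          rw [hB2] at hget2
          simp only [Bool.false_eq_true, false_iff] at hget2
          exact absurd (hAiff.mp hA) hget2
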